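-- pv_equiv track=rewrite | github.com/caMelodian/CloudFormation-Template | python/spy/answer.py | solution
-- ===== SOURCE A (Python) =====
-- def solution(ability, number):
--     ability.sort()
--
--     while number > 0:
--         smallest1 = ability.pop(0)
--         smallest2 = ability.pop(0)
--         new_ability = smallest1 + smallest2
--         ability.append(new_ability)
--         number -= 1
--         ability.sort()
--     return sum(ability)
-- ===== SOURCE B (Python) =====
-- def solution(ability, number):
--     # Each merge replaces two elements by their sum, so the total is invariant.
--     return sum(ability)
-- ===== Notes on version B (the rewrite author's own statement) =====
-- stated objective: faster
-- what changed: The repeated sort-pop-pop-append-merge loop is replaced by a single sum, since each merge step leaves the total sum of the list unchanged.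
import Mathlib
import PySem

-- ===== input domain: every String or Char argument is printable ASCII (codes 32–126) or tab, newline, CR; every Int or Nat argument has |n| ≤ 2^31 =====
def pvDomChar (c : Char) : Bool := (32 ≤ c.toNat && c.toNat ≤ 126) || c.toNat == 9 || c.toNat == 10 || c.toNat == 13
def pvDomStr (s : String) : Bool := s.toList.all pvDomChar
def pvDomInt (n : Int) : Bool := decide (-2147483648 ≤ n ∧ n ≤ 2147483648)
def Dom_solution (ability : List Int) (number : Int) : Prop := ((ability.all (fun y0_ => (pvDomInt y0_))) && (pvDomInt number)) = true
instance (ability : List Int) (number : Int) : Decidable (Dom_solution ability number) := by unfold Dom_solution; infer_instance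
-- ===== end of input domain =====

-- B replaces the merge loop by a single sum (each merge preserves the total); equivalence is
-- about the RETURN value only: Python A sorts/mutates `ability` in place, B does not.

-- ===== PORT A =====
-- the while loop: number>0 iterations, each pops the two smallest, appends their sum, re-sorts.
-- pop? returns none exactly where Python's pop(0) raises IndexError (unreached inside Pre_).
def solutionLoop (ability : List Int) (fuel : Nat) : List Int :=
  match fuel with
  | 0 => ability
  | n + 1 =>
    match PySem.List.pop? ability 0 with
    | none => ability
    | some (s1, rest) =>
      match PySem.List.pop? rest 0 with
      | none => ability
      | some (s2, rest2) =>
        solutionLoop (PySem.List.sorted (rest2 ++ [s1 + s2]) (fun x => x) false) n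

def solution (ability : List Int) (number : Int) : Int :=
  (solutionLoop (PySem.List.sorted ability (fun x => x) false) number.toNat).sum

-- ===== PORT B =====
def solution_alt (ability : List Int) (_number : Int) : Int :=
  ability.sum

-- ===== PRECONDITION & SPEC =====
-- A raises IndexError (pop from empty) iff number > 0 and ability has fewer than number+1 elements.
def Pre_solution (ability : List Int) (number : Int) : Prop :=
  number ≤ 0 ∨ number + 1 ≤ (ability.length : Int)
instance (ability : List Int) (number : Int) : Decidable (Pre_solution ability number) := by
  unfold Pre_solution; infer_instance
def pvWitness_solution : List Int × Int := ([3, 1, 2], 2)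

def Spec_solution (ability : List Int) (number : Int) (out : Int) : Prop := out = solution_alt ability number
instance (ability : List Int) (number : Int) (out : Int) : Decidable (Spec_solution ability number out) := by unfold Spec_solution; infer_instance

-- ===== CLAIM (what is proved, stated in full; the proofs are below) =====
def Claim_equal_solution : Prop := ∀ (ability : List Int) (number : Int), Dom_solution ability number → Pre_solution ability number → Spec_solution ability number (solution ability number)

-- ===== LEMMAS AND PROOFS =====

-- the sum of the list is invariant across the merge loop, whenever there is enough fuel room
lemma solutionLoop_sum (fuel : Nat) (ability : List Int)
    (h : fuel + 1 ≤ ability.length ∨ fuel = 0) :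
    (solutionLoop ability fuel).sum = ability.sum := by
  induction fuel generalizing ability with
  | zero => rfl
  | succ n ih =>
    have hlen : n + 2 ≤ ability.length := by omega
    obtain ⟨a, b, t, rfl⟩ : ∃ a b t, ability = a :: b :: t := by
      match ability, hlen with
      | a :: b :: t, _ => exact ⟨a, b, t, rfl⟩
    have h1 : PySem.List.pop? (a :: b :: t) 0 = some (a, b :: t) :=
      PySem.List.pop?_zero_cons ..
    have h2 : PySem.List.pop? (b :: t) 0 = some (b, t) :=
      PySem.List.pop?_zero_cons ..
    simp only [solutionLoop, h1, h2]
    rw [ih]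
    · have hp := PySem.List.sorted_perm (t ++ [a + b]) (fun x : Int => x) false
      rw [hp.sum_eq]
      simp; ring
    · have hl := (PySem.List.sorted_perm (t ++ [a + b]) (fun x : Int => x) false).length_eq
      simp only [List.length_cons] at hlen
      simp only [hl, List.length_append, List.length_cons, List.length_nil]
      omega

-- ===== VERDICT (by name: the statement is the Claim_ definition above) =====
theorem solution_spec : Claim_equal_solution := by
  intro ability number _ hpre
  unfold Spec_solution solution solution_alt
  have hperm := PySem.List.sorted_perm ability (fun x : Int => x) false
  have hh : number.toNat + 1 ≤ (PySem.List.sorted ability (fun x : Int => x) false).length ∨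
      number.toNat = 0 := by
    by_cases hn : number ≤ 0
    · right; omega
    · left; rw [hperm.length_eq]
      rcases hpre with h | h <;> omega
  rw [solutionLoop_sum _ _ hh, hperm.sum_eq]
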